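-- pv_equiv track=rewrite | github.com/autopkg/dataJAR-recipes | *AutoPkg Linters/RecipeAlphabetiser/RecipeAlphabetiser.py | _build_ordered_recipe
-- ===== SOURCE A (Python) =====
-- def _build_ordered_recipe(recipe_data):
--     """Build recipe dict with standardized key order.
--
--     Args:
--         recipe_data: Recipe data dict
--
--     Returns:
--         Ordered recipe dict
--     """
--     ordered_recipe = {}
--
--     # Standard order for recipe keys
--     key_order = [
--         'Comment',
--         'Description',
--         'Identifier',
--         'Input',
--         'MinimumVersion',
--         'ParentRecipe',
--         'Process'
--     ]
--
--     # Add keys in preferred order if they exist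
--     for key in key_order:
--         if key in recipe_data:
--             ordered_recipe[key] = recipe_data[key]
--
--     # Add any remaining keys not in our standard list
--     for key in recipe_data:
--         if key not in ordered_recipe:
--             ordered_recipe[key] = recipe_data[key]
--
--     return ordered_recipe
-- ===== SOURCE B (Python) =====
-- def _build_ordered_recipe(recipe_data):
--     """Build recipe dict with standardized key order (rank dict + one stable sort)."""
--     key_order = [
--         'Comment',
--         'Description',
--         'Identifier',
--         'Input',
--         'MinimumVersion',
--         'ParentRecipe',
--         'Process'
--     ]
--     rank = {key: index for index, key in enumerate(key_order)}
--     fallback = len(key_order)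
--     ordered_keys = sorted(recipe_data, key=lambda key: rank.get(key, fallback))
--     return {key: recipe_data[key] for key in ordered_keys}
-- ===== Notes on version B (the rewrite author's own statement) =====
-- stated objective: idiomatic
-- what changed: Replaced A's two filtering passes over the dict with a rank dictionary built from key_order plus a single stable sort of the keys (standard keys by rank, all others at a constant fallback rank keeping insertion order), then one dict comprehension.
import Mathlib
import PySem

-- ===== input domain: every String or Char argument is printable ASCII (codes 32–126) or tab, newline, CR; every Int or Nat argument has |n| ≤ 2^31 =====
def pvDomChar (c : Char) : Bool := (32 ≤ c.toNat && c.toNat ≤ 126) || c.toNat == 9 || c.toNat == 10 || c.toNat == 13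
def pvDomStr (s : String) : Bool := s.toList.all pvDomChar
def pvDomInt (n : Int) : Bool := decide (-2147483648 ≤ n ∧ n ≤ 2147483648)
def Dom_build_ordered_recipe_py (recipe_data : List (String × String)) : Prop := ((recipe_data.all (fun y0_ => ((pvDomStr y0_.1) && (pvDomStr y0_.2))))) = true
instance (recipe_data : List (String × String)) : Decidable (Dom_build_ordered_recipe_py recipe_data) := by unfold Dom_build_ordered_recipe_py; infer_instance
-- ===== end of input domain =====

-- B replaces A's two filtering passes with a rank dict + one stable sort of the keys (idiomatic, not faster).


-- ===== PORT A =====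
-- the 'key_order' literal both Pythons contain
def pvKeyOrder : List String :=
  ["Comment", "Description", "Identifier", "Input", "MinimumVersion", "ParentRecipe", "Process"]

-- 'recipe_data[key]' is exact here: it is only evaluated on keys that are in the dict, so the
-- getD default "" is never returned.
def build_ordered_recipe_py (recipe_data : List (String × String)) : List (String × String) :=
  let rd : PySem.Dict String String := PySem.Dict.ofList recipe_data
  -- for key in key_order: if key in recipe_data: ordered_recipe[key] = recipe_data[key]
  let ordered1 : PySem.Dict String String :=
    pvKeyOrder.foldl
      (fun (d : PySem.Dict String String) key =>
        if rd.contains key then d.insert key (rd.getD key "") else d)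
      PySem.Dict.empty
  -- for key in recipe_data: if key not in ordered_recipe: ordered_recipe[key] = recipe_data[key]
  let ordered2 : PySem.Dict String String :=
    rd.keys.foldl
      (fun (d : PySem.Dict String String) key =>
        if ¬ d.contains key then d.insert key (rd.getD key "") else d)
      ordered1
  ordered2.items

-- ===== PORT B =====
-- 'recipe_data[key]' exact for the same reason as in port A (keys come from the dict itself).
def build_ordered_recipe_py_alt (recipe_data : List (String × String)) : List (String × String) :=
  let rd : PySem.Dict String String := PySem.Dict.ofList recipe_data
  -- rank = {key: index for index, key in enumerate(key_order)}
  let rank : PySem.Dict String Int :=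
    PySem.Dict.ofList ((PySem.List.enumerate pvKeyOrder).map (fun p => (p.2, p.1)))
  let fallback : Int := (pvKeyOrder.length : Int)
  -- sorted(recipe_data, key=lambda key: rank.get(key, fallback))
  let orderedKeys : List String :=
    PySem.List.sorted rd.keys (fun key => rank.getD key fallback) false
  -- {key: recipe_data[key] for key in ordered_keys}
  (PySem.Dict.ofList (orderedKeys.map (fun key => (key, rd.getD key "")))).items

-- ===== PRECONDITION & SPEC =====
def Spec_build_ordered_recipe_py (recipe_data : List (String × String)) (out : List (String × String)) : Prop := out = build_ordered_recipe_py_alt recipe_data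
instance (recipe_data : List (String × String)) (out : List (String × String)) : Decidable (Spec_build_ordered_recipe_py recipe_data out) := by unfold Spec_build_ordered_recipe_py; infer_instance

-- ===== CLAIM (what is proved, stated in full; the proofs are below) =====
def Claim_equal_build_ordered_recipe_py : Prop := ∀ (recipe_data : List (String × String)), Dom_build_ordered_recipe_py recipe_data → Spec_build_ordered_recipe_py recipe_data (build_ordered_recipe_py recipe_data)

-- ===== LEMMAS AND PROOFS =====

-- the rank function B's sort uses, written as a plain function
def pvRank (k : String) : Int := if k ∈ pvKeyOrder then (pvKeyOrder.idxOf k : Int) else 7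

-- the common normal form: standard keys present (in key_order order), then the other keys in dict order
def pvStdKeys (ks : List String) : List String := pvKeyOrder.filter (fun k => decide (k ∈ ks))
def pvExtraKeys (ks : List String) : List String := ks.filter (fun k => !decide (k ∈ pvKeyOrder))

lemma pv_rank_getD (k : String) :
    (PySem.Dict.ofList ((PySem.List.enumerate pvKeyOrder).map (fun p => (p.2, p.1))) :
      PySem.Dict String Int).getD k ((pvKeyOrder.length : Int)) = pvRank k := by
  by_cases h0 : "Comment" = k
  · subst h0; decide
  by_cases h1 : "Description" = k
  · subst h1; decide
  by_cases h2 : "Identifier" = k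
  · subst h2; decide
  by_cases h3 : "Input" = k
  · subst h3; decide
  by_cases h4 : "MinimumVersion" = k
  · subst h4; decide
  by_cases h5 : "ParentRecipe" = k
  · subst h5; decide
  by_cases h6 : "Process" = k
  · subst h6; decide
  have hk : k ∉ pvKeyOrder := by
    simp [pvKeyOrder]
    exact ⟨fun h => h0 h.symm, fun h => h1 h.symm, fun h => h2 h.symm, fun h => h3 h.symm,
      fun h => h4 h.symm, fun h => h5 h.symm, fun h => h6 h.symm⟩
  simp only [pvRank, hk, if_false]
  simp [pvKeyOrder, PySem.List.enumerate, PySem.Dict.ofList, PySem.Dict.update,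
    PySem.Dict.getD_eq_get?_getD, PySem.Dict.get?_insert, Ne.symm h0, Ne.symm h1, Ne.symm h2,
    Ne.symm h3, Ne.symm h4, Ne.symm h5, Ne.symm h6, PySem.Dict.get?_empty]

-- B's insertion step on a split list: x goes exactly between the "not before" prefix and the rest
lemma pv_insertBy_split (before : String → String → Bool) (x : String) (ys zs : List String)
    (h1 : ∀ y ∈ ys, before x y = false) (h2 : ∀ z ∈ zs.head?, before x z = true) :
    PySem.List.insertBy before x (ys ++ zs) = ys ++ x :: zs := by
  induction ys with
  | nil =>
    cases zs with
    | nil => rfl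
    | cons z zs =>
      simp only [List.nil_append, PySem.List.insertBy, h2 z rfl, if_true]
  | cons y ys ih =>
    simp only [List.cons_append, PySem.List.insertBy, h1 y (List.mem_cons_self),
      Bool.false_eq_true, if_false]
    exact congrArg (y :: ·) (ih (fun y hy => h1 y (List.mem_cons_of_mem _ hy)))

-- stability: sorting nodup keys by pvRank produces the normal form
lemma pv_sorted_rank (ks : List String) (hnd : ks.Nodup) :
    PySem.List.sorted ks (fun k => pvRank k) false = pvStdKeys ks ++ pvExtraKeys ks := by
  induction ks using List.reverseRecOn with
  | nil => simp [pvStdKeys, pvExtraKeys, PySem.List.sorted]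
  | append_singleton ks k ih =>
    have hnd' : ks.Nodup := hnd.of_append_left
    have hknotin : k ∉ ks := by
      have := List.disjoint_of_nodup_append hnd
      simpa using fun h => this h (by simp)
    have hsplit : PySem.List.sorted (ks ++ [k]) (fun k => pvRank k) false
        = PySem.List.insertBy (fun a b => decide (pvRank a < pvRank b)) k
            (PySem.List.sorted ks (fun k => pvRank k) false) := by
      rw [PySem.List.sorted_eq_foldl_insertBy, PySem.List.sorted_eq_foldl_insertBy,
        List.foldl_append, List.foldl_cons, List.foldl_nil]
    rw [hsplit, ih hnd']
    by_cases hk : k ∈ pvKeyOrder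
    · -- standard key
      obtain ⟨s, t, hdec⟩ := List.append_of_mem hk
      have hnodup : pvKeyOrder.Nodup := by decide
      rw [hdec] at hnodup
      have hks : k ∉ s := fun h => (List.disjoint_of_nodup_append hnodup) h (by simp)
      have hkt : k ∉ t := by
        have := (List.nodup_append.mp hnodup).2.1
        simpa using (List.nodup_cons.mp this).1
      have hrk : pvRank k = (s.length : Int) := by
        rw [pvRank, if_pos hk, hdec, List.idxOf_append_of_notMem hks]
        simp
      -- std ks splits
      have hstd : pvStdKeys ks = s.filter (fun x => decide (x ∈ ks)) ++ t.filter (fun x => decide (x ∈ ks)) := by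
        rw [pvStdKeys, hdec, List.filter_append, List.filter_cons]
        simp [hknotin]
      have hy1 : ∀ y ∈ s.filter (fun x => decide (x ∈ ks)),
          (decide (pvRank k < pvRank y)) = false := by
        intro y hy
        have hys : y ∈ s := List.mem_of_mem_filter hy
        have hymem : y ∈ pvKeyOrder := by rw [hdec]; exact List.mem_append_left _ hys
        have hry : pvRank y = (List.idxOf y s : Int) := by
          rw [pvRank, if_pos hymem, hdec, List.idxOf_append_of_mem hys]
        have : List.idxOf y s < s.length := List.idxOf_lt_length_of_mem hys
        simp [hry, hrk]
        omega
      have hz1 : ∀ z ∈ t.filter (fun x => decide (x ∈ ks)) ++ pvExtraKeys ks,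
          (decide (pvRank k < pvRank z)) = true := by
        intro z hz
        rcases List.mem_append.mp hz with hzt | hze
        · have hzt' : z ∈ t := List.mem_of_mem_filter hzt
          have hzs : z ∉ s := by
            intro h
            exact (List.disjoint_of_nodup_append hnodup) h (by simp [hzt'])
          have hzk : z ≠ k := fun h => hkt (h ▸ hzt')
          have hzmem : z ∈ pvKeyOrder := by
            rw [hdec]; exact List.mem_append_right _ (List.mem_cons_of_mem _ hzt')
          have hrz : pvRank z = ((s.length + List.idxOf z (k :: t) : Nat) : Int) := by
            rw [pvRank, if_pos hzmem, hdec, List.idxOf_append_of_notMem hzs]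
          have h1 : List.idxOf z (k :: t) = List.idxOf z t + 1 := by
            rw [List.idxOf_cons_ne _ (by simpa using hzk.symm)]
          rw [hrz, hrk, h1]
          simp
        · have hznot : z ∉ pvKeyOrder := by
            have := List.of_mem_filter hze
            simpa using this
          have hrz : pvRank z = 7 := by simp [pvRank, hznot]
          have hlen : s.length ≤ 6 := by
            have : pvKeyOrder.length = 7 := by decide
            rw [hdec] at this
            simp at this
            omega
          simp [hrz, hrk]
          omega
      rw [hstd, List.append_assoc]
      rw [pv_insertBy_split _ _ _ _ hy1
        (fun z hz => hz1 z (List.mem_of_mem_head? hz))]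
      -- now compute the RHS for ks ++ [k]
      have hextra : pvExtraKeys (ks ++ [k]) = pvExtraKeys ks := by
        rw [pvExtraKeys, List.filter_append, List.filter_cons]
        simp [hk, pvExtraKeys]
      have hstd2 : pvStdKeys (ks ++ [k])
          = s.filter (fun x => decide (x ∈ ks)) ++ k :: t.filter (fun x => decide (x ∈ ks)) := by
        rw [pvStdKeys, hdec, List.filter_append, List.filter_cons]
        have hsf : s.filter (fun x => decide (x ∈ ks ++ [k])) = s.filter (fun x => decide (x ∈ ks)) := by
          apply List.filter_congr
          intro x hx
          have : x ≠ k := fun h => hks (h ▸ hx)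
          simp [List.mem_append, this]
        have htf : t.filter (fun x => decide (x ∈ ks ++ [k])) = t.filter (fun x => decide (x ∈ ks)) := by
          apply List.filter_congr
          intro x hx
          have : x ≠ k := fun h => hkt (h ▸ hx)
          simp [List.mem_append, this]
        rw [hsf, htf]
        simp
      rw [hstd2, hextra, List.append_assoc]
      simp
    · -- non-standard key: appended at the end
      rw [PySem.List.insertBy_of_forall_not_before]
      · have hextra : pvExtraKeys (ks ++ [k]) = pvExtraKeys ks ++ [k] := by
          rw [pvExtraKeys, List.filter_append, List.filter_cons]
          simp [hk, pvExtraKeys]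
        have hstd : pvStdKeys (ks ++ [k]) = pvStdKeys ks := by
          apply List.filter_congr
          intro x hx
          have : x ≠ k := fun h => hk (h ▸ hx)
          simp [List.mem_append, this]
        rw [hextra, hstd, ← List.append_assoc]
      · intro y _
        have h7 : pvRank y ≤ 7 := by
          unfold pvRank; split_ifs with h
          · have h7 : List.idxOf y pvKeyOrder < 7 := by
              simpa [pvKeyOrder] using List.idxOf_lt_length_of_mem h
            exact_mod_cast Nat.le_of_lt_succ (Nat.lt_succ_of_lt h7)
          · exact le_refl 7
        have hrk : pvRank k = 7 := by simp [pvRank, hk]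
        simp [hrk]
        omega

-- A's first loop
lemma pv_stage1 (rd : PySem.Dict String String) :
    (pvKeyOrder.foldl
      (fun (d : PySem.Dict String String) key =>
        if rd.contains key then d.insert key (rd.getD key "") else d)
      PySem.Dict.empty).items
    = (pvKeyOrder.filter (fun k => rd.contains k)).map (fun k => (k, rd.getD k "")) := by
  rw [PySem.List.foldl_if_eq_foldl_filter]
  rw [PySem.Dict.items_foldl_insert_fresh (k := fun a => a) (v := fun a => rd.getD a "")]
  · rfl
  · intro a _; exact PySem.Dict.contains_empty a
  · simpa using List.Nodup.filter _ (by decide : pvKeyOrder.Nodup)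

-- A's second loop (generic: 'insert if the key is not yet there' appends the fresh keys)
lemma pv_stage2 (g : String → String) (ks : List String) (d : PySem.Dict String String)
    (hnd : ks.Nodup) :
    (ks.foldl
      (fun (d : PySem.Dict String String) key =>
        if ¬ d.contains key then d.insert key (g key) else d) d).items
    = d.items ++ (ks.filter (fun k => !d.contains k)).map (fun k => (k, g k)) := by
  induction ks generalizing d with
  | nil => simp
  | cons k ks ih =>
    rcases List.nodup_cons.mp hnd with ⟨hk, hnd'⟩
    by_cases hc : d.contains k
    · simp only [List.foldl_cons, hc, not_true, if_false, List.filter_cons, Bool.not_true,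
        Bool.false_eq_true]
      exact ih d hnd'
    · rw [List.foldl_cons, if_pos hc, ih (d.insert k (g k)) hnd']
      rw [PySem.Dict.items_insert_of_not_contains _ _ (by simpa using hc)]
      have hfc : ks.filter (fun k' => !(d.insert k (g k)).contains k')
          = ks.filter (fun k' => !d.contains k') := by
        apply List.filter_congr
        intro x hx
        have hxk : x ≠ k := fun h => hk (h ▸ hx)
        simp [PySem.Dict.contains_insert, hxk]
      rw [hfc]
      simp [hc]

lemma pv_A_normal (recipe_data : List (String × String)) :
    build_ordered_recipe_py recipe_data
    = (pvStdKeys (PySem.Dict.ofList recipe_data).keys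
        ++ pvExtraKeys (PySem.Dict.ofList recipe_data).keys).map
        (fun k => (k, (PySem.Dict.ofList recipe_data).getD k "")) := by
  unfold build_ordered_recipe_py
  set rd : PySem.Dict String String := PySem.Dict.ofList recipe_data with hrd
  simp only []
  rw [pv_stage2 _ _ _ (PySem.Dict.nodup_keys_ofList recipe_data), pv_stage1]
  have hk1 : (pvKeyOrder.foldl
      (fun (d : PySem.Dict String String) key =>
        if rd.contains key then d.insert key (rd.getD key "") else d)
      PySem.Dict.empty).keys = pvKeyOrder.filter (fun k => rd.contains k) := by
    rw [PySem.Dict.keys, pv_stage1]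
    simp [Function.comp_def]
  have hstd : pvKeyOrder.filter (fun k => rd.contains k) = pvStdKeys rd.keys := by
    apply List.filter_congr
    intro x _
    exact PySem.Dict.contains_eq_decide_mem_keys rd x
  have hfc : rd.keys.filter
      (fun k => !(pvKeyOrder.foldl
        (fun (d : PySem.Dict String String) key =>
          if rd.contains key then d.insert key (rd.getD key "") else d)
        PySem.Dict.empty).contains k) = pvExtraKeys rd.keys := by
    apply List.filter_congr
    intro x hx
    rw [PySem.Dict.contains_eq_decide_mem_keys, hk1]
    have hxrd : rd.contains x = true := (PySem.Dict.contains_iff_mem_keys rd x).mpr hx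
    simp [List.mem_filter, hxrd]
  rw [hstd, hfc, List.map_append]

lemma pv_B_normal (recipe_data : List (String × String)) :
    build_ordered_recipe_py_alt recipe_data
    = (pvStdKeys (PySem.Dict.ofList recipe_data).keys
        ++ pvExtraKeys (PySem.Dict.ofList recipe_data).keys).map
        (fun k => (k, (PySem.Dict.ofList recipe_data).getD k "")) := by
  unfold build_ordered_recipe_py_alt
  set rd : PySem.Dict String String := PySem.Dict.ofList recipe_data with hrd
  simp only []
  have hkey : (fun key => (PySem.Dict.ofList
        ((PySem.List.enumerate pvKeyOrder).map (fun p => (p.2, p.1))) :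
      PySem.Dict String Int).getD key ((pvKeyOrder.length : Int))) = (fun k => pvRank k) :=
    funext pv_rank_getD
  rw [hkey, pv_sorted_rank rd.keys (PySem.Dict.nodup_keys_ofList recipe_data)]
  -- the comprehension's dict has nodup keys, so ofList keeps the pair list as items
  have hnodup : (pvStdKeys rd.keys ++ pvExtraKeys rd.keys).Nodup := by
    rw [List.nodup_append]
    refine ⟨List.Nodup.filter _ (by decide : pvKeyOrder.Nodup),
      List.Nodup.filter _ (PySem.Dict.nodup_keys_ofList recipe_data),
      fun x hxs y hye => ?_⟩
    rintro rfl
    have h1 : x ∈ pvKeyOrder := List.mem_of_mem_filter hxs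
    have h2 : ¬ x ∈ pvKeyOrder := by simpa using List.of_mem_filter hye
    exact h2 h1
  rw [PySem.Dict.ofList, PySem.Dict.update]
  rw [PySem.Dict.items_foldl_insert_fresh _ Prod.fst Prod.snd _
    (fun a _ => PySem.Dict.contains_empty a.1) (by simpa [Function.comp_def] using hnodup)]
  simp [Function.comp_def, PySem.Dict.empty]

-- ===== VERDICT (by name: the statement is the Claim_ definition above) =====
theorem build_ordered_recipe_py_spec : Claim_equal_build_ordered_recipe_py := by
  intro recipe_data _
  unfold Spec_build_ordered_recipe_py
  rw [pv_A_normal, pv_B_normal]
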